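-- pv_equiv track=rewrite | github.com/dhanush-urs/repobrain | apps/api/app/services/pr_impact_service.py | _evidence_strength_from_edge_types
-- ===== SOURCE A (Python) =====
-- def _evidence_strength_from_edge_types(edge_types: set[str]) -> str:
--     """Return evidence strength based on edge types present."""
--     if any(et in edge_types for et in ("route_to_service", "service_to_model", "uses_symbol")):
--         return "high"
--     if any(et in edge_types for et in ("import", "from_import", "call", "require")):
--         return "medium"
--     if any(et in edge_types for et in ("inferred_api", "inferred", "inferred_naming")):
--         return "low"
--     return "medium"
-- ===== SOURCE B (Python) =====
-- _RANK = {
--     "route_to_service": 3, "service_to_model": 3, "uses_symbol": 3,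
--     "import": 2, "from_import": 2, "call": 2, "require": 2,
--     "inferred_api": 1, "inferred": 1, "inferred_naming": 1,
-- }
--
-- def _evidence_strength_from_edge_types(edge_types: set[str]) -> str:
--     r = 0
--     for et in edge_types:
--         r = max(r, _RANK.get(et, 0))
--     return "high" if r == 3 else ("low" if r == 1 else "medium")
-- ===== Notes on version B (the rewrite author's own statement) =====
-- stated objective: alternative
-- what changed: Replaces three ordered any/membership group tests with a single pass over edge_types taking the maximum numeric rank from a prebuilt table, then translating the rank (3->high, 1->low, 2 or 0->medium).
import Mathlib
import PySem

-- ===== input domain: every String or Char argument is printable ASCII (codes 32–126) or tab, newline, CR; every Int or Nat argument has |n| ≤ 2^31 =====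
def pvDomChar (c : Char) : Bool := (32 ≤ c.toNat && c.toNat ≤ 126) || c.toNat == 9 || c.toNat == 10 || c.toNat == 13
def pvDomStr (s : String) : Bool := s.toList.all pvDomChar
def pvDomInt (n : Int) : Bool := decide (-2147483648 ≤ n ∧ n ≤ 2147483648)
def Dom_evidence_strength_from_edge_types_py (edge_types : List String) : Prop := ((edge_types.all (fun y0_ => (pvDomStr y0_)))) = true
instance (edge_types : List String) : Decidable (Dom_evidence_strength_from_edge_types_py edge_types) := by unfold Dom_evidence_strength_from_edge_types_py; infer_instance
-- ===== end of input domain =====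

-- B replaces A's three ordered group-membership tests by one pass taking the maximum
-- rank from a prebuilt table (alternative decomposition, same cost).


-- ===== PORT A =====
def evidence_strength_from_edge_types_py (edge_types : List String) : String :=
  if "route_to_service" ∈ edge_types ∨ "service_to_model" ∈ edge_types ∨ "uses_symbol" ∈ edge_types then
    "high"
  else if "import" ∈ edge_types ∨ "from_import" ∈ edge_types ∨ "call" ∈ edge_types ∨ "require" ∈ edge_types then
    "medium"
  else if "inferred_api" ∈ edge_types ∨ "inferred" ∈ edge_types ∨ "inferred_naming" ∈ edge_types then
    "low"
  else
    "medium"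

-- ===== PORT B =====
def pvRankTable : PySem.Dict String Int :=
  PySem.Dict.mk [("route_to_service", 3), ("service_to_model", 3), ("uses_symbol", 3),
   ("import", 2), ("from_import", 2), ("call", 2), ("require", 2),
   ("inferred_api", 1), ("inferred", 1), ("inferred_naming", 1)]

def evidence_strength_from_edge_types_py_alt (edge_types : List String) : String :=
  let r := edge_types.foldl (fun m et => max m (PySem.Dict.getD pvRankTable et 0)) 0
  if r == 3 then "high" else if r == 1 then "low" else "medium"

-- ===== PRECONDITION & SPEC =====
def Spec_evidence_strength_from_edge_types_py (edge_types : List String) (out : String) : Prop := out = evidence_strength_from_edge_types_py_alt edge_types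
instance (edge_types : List String) (out : String) : Decidable (Spec_evidence_strength_from_edge_types_py edge_types out) := by unfold Spec_evidence_strength_from_edge_types_py; infer_instance

-- ===== CLAIM (what is proved, stated in full; the proofs are below) =====
def Claim_equal_evidence_strength_from_edge_types_py : Prop := ∀ (edge_types : List String), Dom_evidence_strength_from_edge_types_py edge_types → Spec_evidence_strength_from_edge_types_py edge_types (evidence_strength_from_edge_types_py edge_types)

-- ===== LEMMAS AND PROOFS =====

-- the rank of a single string, by group
lemma rank_char (x : String) :
    PySem.Dict.getD pvRankTable x 0 =
      if "route_to_service" = x ∨ "service_to_model" = x ∨ "uses_symbol" = x then 3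
      else if "import" = x ∨ "from_import" = x ∨ "call" = x ∨ "require" = x then 2
      else if "inferred_api" = x ∨ "inferred" = x ∨ "inferred_naming" = x then 1
      else 0 := by
  simp only [pvRankTable, PySem.Dict.getD, PySem.Dict.get?_mk_cons]
  split_ifs <;> simp_all [PySem.Dict.get?]

lemma rank_nonneg (x : String) : 0 ≤ PySem.Dict.getD pvRankTable x 0 := by
  rw [rank_char]; split_ifs <;> omega

lemma foldl_max_acc (l : List String) (a : Int) (ha : 0 ≤ a) :
    l.foldl (fun m et => max m (PySem.Dict.getD pvRankTable et 0)) a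
      = max a (l.foldl (fun m et => max m (PySem.Dict.getD pvRankTable et 0)) 0) := by
  induction l generalizing a with
  | nil => simpa using ha
  | cons x l ih =>
      simp only [List.foldl_cons]
      rw [ih _ (by omega), ih (max 0 _) (by omega)]
      have := rank_nonneg x
      omega

-- characterisation of the folded maximum in terms of group membership
lemma fold_char (l : List String) :
    l.foldl (fun m et => max m (PySem.Dict.getD pvRankTable et 0)) 0
      = if "route_to_service" ∈ l ∨ "service_to_model" ∈ l ∨ "uses_symbol" ∈ l then 3
        else if "import" ∈ l ∨ "from_import" ∈ l ∨ "call" ∈ l ∨ "require" ∈ l then 2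
        else if "inferred_api" ∈ l ∨ "inferred" ∈ l ∨ "inferred_naming" ∈ l then 1
        else 0 := by
  induction l with
  | nil => simp
  | cons x l ih =>
      simp only [List.foldl_cons]
      rw [foldl_max_acc _ _ (le_max_left 0 _), ih, rank_char x]
      simp only [List.mem_cons]
      split_ifs <;> simp_all

-- ===== VERDICT (by name: the statement is the Claim_ definition above) =====
theorem evidence_strength_from_edge_types_py_spec : Claim_equal_evidence_strength_from_edge_types_py := by
  intro l _
  unfold Spec_evidence_strength_from_edge_types_py
  unfold evidence_strength_from_edge_types_py evidence_strength_from_edge_types_py_alt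
  rw [fold_char]
  split_ifs <;> simp_all
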